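-- pv_equiv track=rewrite | github.com/pypi-data/pypi-mirror-39 | packages/navegador5/navegador5-0.60.tar.gz/navegador5-0.60/navegador5/jsurl.py | URIstr2arr
-- ===== SOURCE A (Python) =====
-- def URIstr2arr(s):
--     arr = []
--     lngth = s.__len__()
--     i = 0
--     while(i<lngth):
--         c = s[i]
--         if(c == '%'):
--             arr.append(s[i:(i+3)])
--             i = i + 3
--         else:
--             arr.append(c)
--             i = i + 1
--     return(arr)
-- ===== SOURCE B (Python) =====
-- def URIstr2arr(s):
--     out = []
--     it = iter(s)
--     for c in it:
--         if c == '%':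
--             c += next(it, '') + next(it, '')
--         out.append(c)
--     return out
-- ===== Notes on version B (the rewrite author's own statement) =====
-- stated objective: idiomatic
-- what changed: Replaced the index-arithmetic while loop with slicing by a for-loop over a character iterator that pulls up to two extra characters with next(it, '') after a percent sign, removing all index/length bookkeeping and slices.
import Mathlib
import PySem

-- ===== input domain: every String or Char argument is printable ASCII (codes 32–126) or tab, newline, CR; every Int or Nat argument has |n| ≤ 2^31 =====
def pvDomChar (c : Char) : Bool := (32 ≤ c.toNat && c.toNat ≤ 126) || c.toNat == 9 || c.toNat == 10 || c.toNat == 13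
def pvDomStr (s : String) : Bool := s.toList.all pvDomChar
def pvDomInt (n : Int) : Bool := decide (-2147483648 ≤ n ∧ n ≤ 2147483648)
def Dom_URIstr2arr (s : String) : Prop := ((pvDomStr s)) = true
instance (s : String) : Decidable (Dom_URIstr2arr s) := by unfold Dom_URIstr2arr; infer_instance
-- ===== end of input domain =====

-- B replaces A's index-arithmetic while loop (slices, i = i + 3 bookkeeping) by a single pass
-- that pulls up to two extra characters after each '%' — idiomatic iterator style, same values.

-- ===== PORT A =====
-- the while loop of A: state = (i, arr); c = s[i] via pyGet?, s[i:i+3] via slice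
def URIstr2arrGo (s : List Char) (lngth : Int) (i : Int) (arr : List String) : List String :=
  if _h : i < lngth then
    match PySem.List.pyGet? s i with
    | none => arr  -- unreachable when lngth = len(s) and 0 ≤ i (loop invariant); guard for totality only
    | some c =>
      if c = '%' then
        URIstr2arrGo s lngth (i + 3) (arr ++ [String.ofList (PySem.List.slice s (some i) (some (i + 3)))])
      else
        URIstr2arrGo s lngth (i + 1) (arr ++ [String.ofList [c]])
  else arr
termination_by (lngth - i).toNat
decreasing_by all_goals omega

def URIstr2arr (s : String) : List String :=
  URIstr2arrGo s.toList (s.toList.length : Int) 0 []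

-- ===== PORT B =====
-- B's for-loop over the iterator: after a '%', next(it,'') twice = take 2 of the remainder
def URIstr2arrAltGo : List Char → List String
  | [] => []
  | c :: rest =>
    if c = '%' then
      String.ofList (c :: rest.take 2) :: URIstr2arrAltGo (rest.drop 2)
    else
      String.ofList [c] :: URIstr2arrAltGo rest
termination_by cs => cs.length
decreasing_by all_goals (simp; try omega)

def URIstr2arr_alt (s : String) : List String := URIstr2arrAltGo s.toList

-- ===== PRECONDITION & SPEC =====
def Spec_URIstr2arr (s : String) (out : List String) : Prop := out = URIstr2arr_alt s
instance (s : String) (out : List String) : Decidable (Spec_URIstr2arr s out) := by unfold Spec_URIstr2arr; infer_instance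

-- ===== CLAIM (what is proved, stated in full; the proofs are below) =====
def Claim_equal_URIstr2arr : Prop := ∀ (s : String), Dom_URIstr2arr s → Spec_URIstr2arr s (URIstr2arr s)

-- ===== LEMMAS AND PROOFS =====

-- loop invariant: A's loop at index i = pre.length over pre ++ rest produces arr ++ B's tokens of rest
lemma URIstr2arr_go_spec : ∀ (n : Nat) (rest pre : List Char) (arr : List String), rest.length ≤ n →
    URIstr2arrGo (pre ++ rest) ((pre ++ rest).length : Int) (pre.length : Int) arr
      = arr ++ URIstr2arrAltGo rest := by
  intro n
  induction n with
  | zero =>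
    intro rest pre arr hle
    have hr : rest = [] := by
      cases rest with
      | nil => rfl
      | cons a l => simp at hle
    subst hr
    simp [URIstr2arrGo, URIstr2arrAltGo]
  | succ n ih =>
    intro rest pre arr hle
    cases rest with
    | nil =>
      simp [URIstr2arrGo, URIstr2arrAltGo]
    | cons c cs =>
      rw [URIstr2arrGo]
      have hlt : (pre.length : Int) < ((pre ++ c :: cs).length : Int) := by
        simp only [List.length_append, List.length_cons]; push_cast; omega
      rw [dif_pos hlt]
      simp only [PySem.List.pyGet?_append_length]
      by_cases hc : c = '%'
      · rw [if_pos hc]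
        have hslice : PySem.List.slice (pre ++ c :: cs) (some (pre.length : Int))
            (some ((pre.length : Int) + 3)) = (c :: cs).take 3 := by
          have h3 : ((pre.length : Int) + 3) = ((pre.length + 3 : Nat) : Int) := by push_cast; ring
          rw [h3, PySem.List.slice_natCast]
          simp
        rw [hslice]
        by_cases hlen : 2 ≤ cs.length
        · -- full escape: recast i+3 as the length of pre ++ (c :: cs.take 2)
          have hsplit : pre ++ c :: cs = (pre ++ c :: cs.take 2) ++ cs.drop 2 := by
            simp
          have hi : (pre.length : Int) + 3 = (((pre ++ c :: cs.take 2).length : Nat) : Int) := by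
            simp; omega
          rw [hi]
          conv_lhs => rw [hsplit]
          rw [ih (cs.drop 2) (pre ++ c :: cs.take 2) _ (by simp at hle ⊢; omega)]
          rw [URIstr2arrAltGo, if_pos hc]
          have : (c :: cs).take 3 = c :: cs.take 2 := by simp
          simp [this]
        · -- truncated escape at the end: i+3 ≥ lngth, both sides stop with one token
          rw [URIstr2arrGo]
          have : ¬ ((pre.length : Int) + 3 < ((pre ++ c :: cs).length : Int)) := by
            simp only [List.length_append, List.length_cons, not_lt]; push_cast; omega
          rw [dif_neg this]
          rw [URIstr2arrAltGo, if_pos hc]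
          have hdrop : cs.drop 2 = [] := by
            rw [List.drop_eq_nil_iff]; omega
          have htake3 : (c :: cs).take 3 = c :: cs.take 2 := by simp
          rw [hdrop, URIstr2arrAltGo, htake3]
      · rw [if_neg hc]
        have hsplit : pre ++ c :: cs = (pre ++ [c]) ++ cs := by simp
        have hi : (pre.length : Int) + 1 = (((pre ++ [c]).length : Nat) : Int) := by
          simp
        rw [hi]
        conv_lhs => rw [hsplit]
        rw [ih cs (pre ++ [c]) _ (by simp at hle; omega)]
        rw [URIstr2arrAltGo, if_neg hc]
        simp

-- ===== VERDICT (by name: the statement is the Claim_ definition above) =====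
theorem URIstr2arr_spec : Claim_equal_URIstr2arr := by
  unfold Claim_equal_URIstr2arr
  intro s _
  unfold Spec_URIstr2arr URIstr2arr URIstr2arr_alt
  have h := URIstr2arr_go_spec s.toList.length s.toList [] [] (le_refl _)
  simpa using h
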